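-- pv_equiv track=rewrite | github.com/ahanson8UTK/QE_Resubmit_Python | src/cw2017/math/fill_q.py | _mask_structure
-- ===== SOURCE A (Python) =====
-- from typing import Dict
--
-- def _mask_structure(info: Dict[str, int]):
--     N = int(info["Nstates"])
--     Nm = int(info["Nm"])
--     Ng = int(info["Ng"])
--     Nmg = Nm + Ng
--
--     mask = [[False for _ in range(N)] for _ in range(N)]
--     rows: list[int] = []
--     cols: list[int] = []
--     for i in range(N):
--         if i == Nm + 1:
--             continue
--         for j in range(N):
--             if i == j:
--                 continue
--             if i >= Nmg and j < Nmg: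
--                 continue
--             if i == Nm and j == Nm + 1:
--                 continue
--             mask[i][j] = True
--             rows.append(i)
--             cols.append(j)
--     return mask, rows, cols
-- ===== SOURCE B (Python) =====
-- def _mask_structure(info):
--     N = int(info["Nstates"])
--     Nm = int(info["Nm"])
--     Ng = int(info["Ng"])
--     Nmg = Nm + Ng
--
--     # default-allow, then clear the forbidden structure in bulk
--     mask = [[True for _ in range(N)] for _ in range(N)]
--     if 0 <= Nm + 1 < N:
--         mask[Nm + 1] = [False for _ in range(N)]
--     for k in range(N):
--         mask[k][k] = False
--     for i in range(max(Nmg, 0), N):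
--         for j in range(min(Nmg, N)):
--             mask[i][j] = False
--     if 0 <= Nm < N and 0 <= Nm + 1 < N:
--         mask[Nm][Nm + 1] = False
--
--     # separate row-major collection pass over the finished mask
--     rows: list[int] = []
--     cols: list[int] = []
--     for i in range(N):
--         for j in range(N):
--             if mask[i][j]:
--                 rows.append(i)
--                 cols.append(j)
--     return mask, rows, cols
-- ===== Notes on version B (the rewrite author's own statement) =====
-- stated objective: alternative
-- what changed: B builds the mask as all-True and clears the forbidden structure in bulk (whole skipped row, diagonal, the i>=Nm+Ng/j<Nm+Ng block, one cell), then collects rows/cols in a separate row-major scan of the finished mask, instead of A's single fused loop that per-cell branch-filters and sets/appends together.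
import Mathlib
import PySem

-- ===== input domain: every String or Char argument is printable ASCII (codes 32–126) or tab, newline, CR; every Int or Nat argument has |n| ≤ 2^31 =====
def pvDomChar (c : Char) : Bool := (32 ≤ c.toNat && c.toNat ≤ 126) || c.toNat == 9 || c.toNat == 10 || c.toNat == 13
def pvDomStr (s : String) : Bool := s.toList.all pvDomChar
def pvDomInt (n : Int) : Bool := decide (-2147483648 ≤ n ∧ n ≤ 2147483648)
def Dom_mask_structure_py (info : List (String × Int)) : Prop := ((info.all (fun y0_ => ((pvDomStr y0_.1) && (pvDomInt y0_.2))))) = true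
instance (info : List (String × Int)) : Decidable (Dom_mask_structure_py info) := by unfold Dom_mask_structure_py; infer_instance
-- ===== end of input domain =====

-- B builds the mask default-allow and clears the forbidden structure in bulk, then collects
-- rows/cols in a separate row-major scan; same return value as A on every input A accepts.

-- ===== PORT A =====
-- A's body after the three dict reads (Nmg written out as Nm + Ng); one fused loop that
-- per-cell branch-filters, sets mask[i][j] and appends to rows/cols together.
def pvA_core (N Nm Ng : Int) : List (List Bool) × List Int × List Int :=
  (PySem.List.pyRange 0 N 1).foldl
    (fun (st : List (List Bool) × List Int × List Int) i =>
      if i = Nm + 1 then st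
      else
        (PySem.List.pyRange 0 N 1).foldl
          (fun (st : List (List Bool) × List Int × List Int) j =>
            if i = j then st
            else if Nm + Ng ≤ i ∧ j < Nm + Ng then st
            else if i = Nm ∧ j = Nm + 1 then st
            else (PySem.List.pySetD st.1 i
                    (PySem.List.pySetD (PySem.List.pyGetD st.1 i []) j true),
                  st.2.1 ++ [i], st.2.2 ++ [j]))
          st)
    ((PySem.List.pyRange 0 N 1).map fun _ => (PySem.List.pyRange 0 N 1).map fun _ => false,
     ([] : List Int), ([] : List Int))

def mask_structure_py (info : List (String × Int)) : List (List Bool) × List Int × List Int :=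
  pvA_core ((PySem.Dict.mk info).getD "Nstates" 0)
    ((PySem.Dict.mk info).getD "Nm" 0) ((PySem.Dict.mk info).getD "Ng" 0)

-- ===== PORT B =====
-- mask = [[True]*N]*N-style comprehension
def pvB_mask0 (N : Int) : List (List Bool) :=
  (PySem.List.pyRange 0 N 1).map fun _ => (PySem.List.pyRange 0 N 1).map fun _ => true
-- if 0 <= Nm+1 < N: mask[Nm+1] = [False]*N
def pvB_mask1 (N Nm : Int) : List (List Bool) :=
  if 0 ≤ Nm + 1 ∧ Nm + 1 < N then
    PySem.List.pySetD (pvB_mask0 N) (Nm + 1) ((PySem.List.pyRange 0 N 1).map fun _ => false)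
  else pvB_mask0 N
-- for k in range(N): mask[k][k] = False
def pvB_mask2 (N Nm : Int) : List (List Bool) :=
  (PySem.List.pyRange 0 N 1).foldl
    (fun m k => PySem.List.pySetD m k (PySem.List.pySetD (PySem.List.pyGetD m k []) k false))
    (pvB_mask1 N Nm)
-- for i in range(max(Nmg,0), N): for j in range(min(Nmg,N)): mask[i][j] = False
def pvB_mask3 (N Nm Ng : Int) : List (List Bool) :=
  (PySem.List.pyRange (max (Nm + Ng) 0) N 1).foldl
    (fun m i =>
      (PySem.List.pyRange 0 (min (Nm + Ng) N) 1).foldl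
        (fun m j => PySem.List.pySetD m i (PySem.List.pySetD (PySem.List.pyGetD m i []) j false))
        m)
    (pvB_mask2 N Nm)
-- if 0 <= Nm < N and 0 <= Nm+1 < N: mask[Nm][Nm+1] = False
def pvB_mask (N Nm Ng : Int) : List (List Bool) :=
  if (0 ≤ Nm ∧ Nm < N) ∧ 0 ≤ Nm + 1 ∧ Nm + 1 < N then
    PySem.List.pySetD (pvB_mask3 N Nm Ng) Nm
      (PySem.List.pySetD (PySem.List.pyGetD (pvB_mask3 N Nm Ng) Nm []) (Nm + 1) false)
  else pvB_mask3 N Nm Ng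
-- the separate row-major collection pass over the finished mask
def pvB_collect (N : Int) (mask : List (List Bool)) : List Int × List Int :=
  (PySem.List.pyRange 0 N 1).foldl
    (fun (rc : List Int × List Int) i =>
      (PySem.List.pyRange 0 N 1).foldl
        (fun (rc : List Int × List Int) j =>
          if PySem.List.pyGetD (PySem.List.pyGetD mask i []) j false then
            (rc.1 ++ [i], rc.2 ++ [j])
          else rc)
        rc)
    (([] : List Int), ([] : List Int))

def mask_structure_py_alt (info : List (String × Int)) : List (List Bool) × List Int × List Int :=
  let N := (PySem.Dict.mk info).getD "Nstates" 0
  let Nm := (PySem.Dict.mk info).getD "Nm" 0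
  let Ng := (PySem.Dict.mk info).getD "Ng" 0
  let mask := pvB_mask N Nm Ng
  let rc := pvB_collect N mask
  (mask, rc.1, rc.2)

-- ===== PRECONDITION & SPEC =====
-- Pre_ excludes exactly the inputs on which A raises KeyError: one of the three keys missing.
def Pre_mask_structure_py (info : List (String × Int)) : Prop :=
  (PySem.Dict.mk info).contains "Nstates" = true ∧
  (PySem.Dict.mk info).contains "Nm" = true ∧
  (PySem.Dict.mk info).contains "Ng" = true
instance (info : List (String × Int)) : Decidable (Pre_mask_structure_py info) := by
  unfold Pre_mask_structure_py; infer_instance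
def pvWitness_mask_structure_py : (List (String × Int)) :=
  [("Nstates", 3), ("Nm", 0), ("Ng", 1)]
def Spec_mask_structure_py (info : List (String × Int)) (out : List (List Bool) × List Int × List Int) : Prop := out = mask_structure_py_alt info
instance (info : List (String × Int)) (out : List (List Bool) × List Int × List Int) : Decidable (Spec_mask_structure_py info out) := by unfold Spec_mask_structure_py; infer_instance

-- ===== CLAIM (what is proved, stated in full; the proofs are below) =====
def Claim_equal_mask_structure_py : Prop := ∀ (info : List (String × Int)), Dom_mask_structure_py info → Pre_mask_structure_py info → Spec_mask_structure_py info (mask_structure_py info)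

-- ===== LEMMAS AND PROOFS =====

-- the predicate that the fused conditions of A compute, and the common canonical result
def pvForbid (Nm Ng i j : Int) : Bool :=
  decide (i = j) || decide (Nm + Ng ≤ i ∧ j < Nm + Ng) || decide (i = Nm ∧ j = Nm + 1)
def pvAllow (Nm Ng i j : Int) : Bool := !decide (i = Nm + 1) && !pvForbid Nm Ng i j
def pvRow (N Nm Ng i : Int) : List Bool :=
  (PySem.List.pyRange 0 N 1).map fun j => pvAllow Nm Ng i j
def pvMask (N Nm Ng : Int) : List (List Bool) :=
  (PySem.List.pyRange 0 N 1).map fun i => pvRow N Nm Ng i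
def pvRows (N Nm Ng : Int) : List Int :=
  (PySem.List.pyRange 0 N 1).flatMap fun i =>
    ((PySem.List.pyRange 0 N 1).filter fun j => pvAllow Nm Ng i j).map fun _ => i
def pvCols (N Nm Ng : Int) : List Int :=
  (PySem.List.pyRange 0 N 1).flatMap fun i =>
    (PySem.List.pyRange 0 N 1).filter fun j => pvAllow Nm Ng i j

-- generic fold-shape lemmas --------------------------------------------------

theorem pv_foldl_pair {β σ₁ σ₂ : Type} (l : List β) (step : σ₁ × σ₂ → β → σ₁ × σ₂)
    (f : σ₁ → β → σ₁) (g : σ₂ → β → σ₂) (h : ∀ s e, step s e = (f s.1 e, g s.2 e))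
    (a : σ₁) (b : σ₂) : l.foldl step (a, b) = (l.foldl f a, l.foldl g b) := by
  have hs : step = fun s e => (f s.1 e, g s.2 e) := funext fun s => funext fun e => h s e
  rw [hs]; exact PySem.List.foldl_prod_mk f g l a b

theorem pv_foldl_triple {β σ₁ σ₂ σ₃ : Type} (l : List β)
    (step : σ₁ × σ₂ × σ₃ → β → σ₁ × σ₂ × σ₃)
    (f : σ₁ → β → σ₁) (g : σ₂ → β → σ₂) (h : σ₃ → β → σ₃)
    (hs : ∀ s e, step s e = (f s.1 e, g s.2.1 e, h s.2.2 e)) (a : σ₁) (b : σ₂) (c : σ₃) :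
    l.foldl step (a, b, c) = (l.foldl f a, l.foldl g b, l.foldl h c) := by
  rw [pv_foldl_pair l step f (fun s e => (g s.1 e, h s.2 e)) (fun s e => hs s e) a (b, c)]
  rw [pv_foldl_pair l _ g h (fun s e => rfl) b c]

theorem pv_setget (m : List (List Bool)) {i : Int} (hi : 0 ≤ i) :
    PySem.List.pySetD m i (PySem.List.pyGetD m i []) = m := by
  rw [PySem.List.pySetD_of_nonneg _ _ hi, PySem.List.pyGetD_of_nonneg _ _ hi]
  apply List.ext_getElem?
  intro k
  rw [List.getElem?_set]
  by_cases hk : i.toNat = k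
  · rw [if_pos hk]
    subst hk
    by_cases hlt : i.toNat < m.length
    · rw [if_pos hlt, List.getD_eq_getElem?_getD, List.getElem?_eq_getElem hlt]
      rfl
    · rw [if_neg hlt, List.getElem?_eq_none (by omega)]
  · rw [if_neg hk]

-- a loop whose iteration k rewrites row k only, over distinct nonnegative indices
theorem pv_rowfold (f : Int → List Bool → List Bool) (ks : List Int)
    (hk : ∀ k ∈ ks, 0 ≤ k) (hd : ks.Nodup) (m : List (List Bool)) (i : Nat) :
    (ks.foldl (fun m k => PySem.List.pySetD m k (f k (PySem.List.pyGetD m k []))) m)[i]? =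
      if ((i : Int) ∈ ks) then m[i]?.map (f (i : Int)) else m[i]? := by
  induction ks generalizing m with
  | nil => simp
  | cons k ks ih =>
    have hk0 : 0 ≤ k := hk k (by simp)
    simp only [List.foldl_cons]
    rw [ih (fun x hx => hk x (by simp [hx])) hd.of_cons]
    have hknotin : k ∉ ks := by
      have := hd; simp [List.nodup_cons] at this; exact this.1
    rw [PySem.List.pySetD_of_nonneg _ _ hk0, PySem.List.pyGetD_of_nonneg _ _ hk0]
    by_cases hmem : (i : Int) ∈ ks
    · have hik : (i : Int) ≠ k := fun h => hknotin (h ▸ hmem)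
      have hik' : k.toNat ≠ i := by omega
      rw [if_pos hmem, if_pos (List.mem_cons_of_mem _ hmem), List.getElem?_set, if_neg hik']
    · by_cases hik : (i : Int) = k
      · have hik' : k.toNat = i := by omega
        rw [if_neg hmem, if_pos (List.mem_cons.mpr (Or.inl hik)), List.getElem?_set,
          if_pos hik']
        by_cases hlt : k.toNat < m.length
        · rw [if_pos hlt, List.getElem?_eq_getElem (show i < m.length by omega),
            List.getD_eq_getElem?_getD, List.getElem?_eq_getElem hlt]
          simp [← hik]
        · rw [if_neg hlt, List.getElem?_eq_none (show m.length ≤ i by omega)]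
          rfl
      · have hik' : k.toNat ≠ i := by omega
        rw [if_neg hmem, if_neg (by simp [hik, hmem]), List.getElem?_set, if_neg hik']

-- a loop over columns of one fixed row i factors through that row
theorem pv_colfold (i : Int) (hi : 0 ≤ i) (rstep : List Bool → Int → List Bool)
    (js : List Int) (m : List (List Bool)) :
    js.foldl (fun m j => PySem.List.pySetD m i (rstep (PySem.List.pyGetD m i []) j)) m
      = PySem.List.pySetD m i (js.foldl rstep (PySem.List.pyGetD m i [])) := by
  induction js generalizing m with
  | nil => simp [pv_setget m hi]
  | cons j js ih =>
    simp only [List.foldl_cons]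
    rw [ih]
    by_cases h : i.toNat < m.length
    · have hget : PySem.List.pyGetD
          (PySem.List.pySetD m i (rstep (PySem.List.pyGetD m i []) j)) i [] =
          rstep (PySem.List.pyGetD m i []) j := by
        rw [PySem.List.pySetD_of_nonneg _ _ hi, PySem.List.pyGetD_of_nonneg _ _ hi,
          List.getD_eq_getElem?_getD, List.getElem?_set]
        simp [h]
      rw [hget, PySem.List.pySetD_of_nonneg _ _ hi, PySem.List.pySetD_of_nonneg _ _ hi,
        PySem.List.pySetD_of_nonneg _ _ hi, List.set_set]
    · have hset : ∀ r, PySem.List.pySetD m i r = m := fun r => by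
        rw [PySem.List.pySetD_of_nonneg _ _ hi]
        exact List.set_eq_of_length_le (by omega)
      simp [hset]

-- element characterisation of a conditional row-setting loop
theorem pv_rowset (g : Int → Bool) (v : Bool) (js : List Int) (hjs : ∀ j ∈ js, 0 ≤ j)
    (row : List Bool) (k : Nat) :
    (js.foldl (fun row j => if g j then row else PySem.List.pySetD row j v) row)[k]? =
      if ((k : Int) ∈ js ∧ g (k : Int) = false ∧ k < row.length) then some v else row[k]? := by
  induction js generalizing row with
  | nil => simp
  | cons j js ih =>
    have hj0 : 0 ≤ j := hjs j (by simp)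
    simp only [List.foldl_cons]
    by_cases hgj : g j = true
    · rw [if_pos hgj, ih (fun x hx => hjs x (by simp [hx]))]
      by_cases hc : ((k : Int) ∈ js ∧ g (k : Int) = false ∧ k < row.length)
      · rw [if_pos hc, if_pos ⟨List.mem_cons_of_mem _ hc.1, hc.2⟩]
      · rw [if_neg hc, if_neg (fun hc2 => hc ⟨by
          rcases List.mem_cons.mp hc2.1 with h | h
          · exact absurd hc2.2.1 (by simp [h, hgj])
          · exact h, hc2.2⟩)]
    · rw [if_neg hgj, ih (fun x hx => hjs x (by simp [hx])), PySem.List.length_pySetD,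
        PySem.List.pySetD_of_nonneg _ _ hj0]
      have hgf : g j = false := by simpa using hgj
      by_cases hc : ((k : Int) ∈ js ∧ g (k : Int) = false ∧ k < row.length)
      · rw [if_pos hc, if_pos ⟨List.mem_cons_of_mem _ hc.1, hc.2⟩]
      · rw [if_neg hc, List.getElem?_set]
        by_cases hjk : j.toNat = k
        · have hjk' : j = (k : Int) := by omega
          rw [if_pos hjk]
          by_cases hl : j.toNat < row.length
          · rw [if_pos hl,
              if_pos (show (k : Int) ∈ j :: js ∧ g (k : Int) = false ∧ k < row.length from
                ⟨by simp [hjk'], by rw [← hjk']; exact hgf, by omega⟩)]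
          · rw [if_neg hl, if_neg (fun hc2 => hl (by rw [hjk]; exact hc2.2.2)),
              List.getElem?_eq_none (by omega)]
        · rw [if_neg hjk,
            if_neg (fun hc2 => hc ⟨by
              rcases List.mem_cons.mp hc2.1 with h | h
              · exact absurd h (by omega)
              · exact h, hc2.2⟩)]


-- length preservation through an update loop
theorem pv_foldl_length {α β : Type} (l : List β) (step : List α → β → List α)
    (h : ∀ m e, (step m e).length = m.length) (m : List α) :
    (l.foldl step m).length = m.length := by
  induction l generalizing m with
  | nil => rfl
  | cons e l ih => rw [List.foldl_cons, ih, h]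

theorem pvAllow_eq (Nm Ng i j : Int) :
    pvAllow Nm Ng i j =
      decide (¬(i = Nm + 1) ∧ ¬(i = j) ∧ ¬(Nm + Ng ≤ i ∧ j < Nm + Ng) ∧
        ¬(i = Nm ∧ j = Nm + 1)) := by
  unfold pvAllow pvForbid
  by_cases h1 : i = Nm + 1 <;> by_cases h2 : i = j <;>
    by_cases h3 : Nm + Ng ≤ i ∧ j < Nm + Ng <;> by_cases h4 : i = Nm ∧ j = Nm + 1 <;>
      simp [h1, h2, h3, h4]

theorem pv_some_decide_false {P : Prop} [Decidable P] (h : ¬ P) :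
    (some false : Option Bool) = some (decide P) := by simp [h]
theorem pv_some_decide_true {P : Prop} [Decidable P] (h : P) :
    (some true : Option Bool) = some (decide P) := by simp [h]

-- A-side fold components ------------------------------------------------------

def pvA_fM (N Nm Ng : Int) (m : List (List Bool)) (i : Int) : List (List Bool) :=
  if i = Nm + 1 then m
  else
    (PySem.List.pyRange 0 N 1).foldl
      (fun m j =>
        if i = j then m
        else if Nm + Ng ≤ i ∧ j < Nm + Ng then m
        else if i = Nm ∧ j = Nm + 1 then m
        else PySem.List.pySetD m i (PySem.List.pySetD (PySem.List.pyGetD m i []) j true))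
      m

def pvA_fR (N Nm Ng : Int) (r : List Int) (i : Int) : List Int :=
  if i = Nm + 1 then r
  else
    (PySem.List.pyRange 0 N 1).foldl
      (fun r j =>
        if i = j then r
        else if Nm + Ng ≤ i ∧ j < Nm + Ng then r
        else if i = Nm ∧ j = Nm + 1 then r
        else r ++ [i])
      r

def pvA_fC (N Nm Ng : Int) (c : List Int) (i : Int) : List Int :=
  if i = Nm + 1 then c
  else
    (PySem.List.pyRange 0 N 1).foldl
      (fun c j =>
        if i = j then c
        else if Nm + Ng ≤ i ∧ j < Nm + Ng then c
        else if i = Nm ∧ j = Nm + 1 then c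
        else c ++ [j])
      c

theorem pvA_split (N Nm Ng : Int) :
    pvA_core N Nm Ng =
      ((PySem.List.pyRange 0 N 1).foldl (pvA_fM N Nm Ng)
         ((PySem.List.pyRange 0 N 1).map fun _ => (PySem.List.pyRange 0 N 1).map fun _ => false),
       (PySem.List.pyRange 0 N 1).foldl (pvA_fR N Nm Ng) [],
       (PySem.List.pyRange 0 N 1).foldl (pvA_fC N Nm Ng) []) := by
  unfold pvA_core
  refine pv_foldl_triple _ _ _ _ _ ?_ _ _ _
  intro s e
  unfold pvA_fM pvA_fR pvA_fC
  by_cases he : e = Nm + 1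
  · rw [if_pos he, if_pos he, if_pos he, if_pos he]
  · rw [if_neg he, if_neg he, if_neg he, if_neg he]
    exact pv_foldl_triple _ _ _ _ _ (fun t j => by
      by_cases h1 : e = j
      · rw [if_pos h1, if_pos h1, if_pos h1, if_pos h1]
      · rw [if_neg h1, if_neg h1, if_neg h1, if_neg h1]
        by_cases h2 : Nm + Ng ≤ e ∧ j < Nm + Ng
        · rw [if_pos h2, if_pos h2, if_pos h2, if_pos h2]
        · rw [if_neg h2, if_neg h2, if_neg h2, if_neg h2]
          by_cases h3 : e = Nm ∧ j = Nm + 1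
          · rw [if_pos h3, if_pos h3, if_pos h3, if_pos h3]
          · rw [if_neg h3, if_neg h3, if_neg h3, if_neg h3]) s.1 s.2.1 s.2.2

-- the row a single non-skipped iteration of A's outer loop produces
def pvA_row (N Nm Ng : Int) (i : Int) (row : List Bool) : List Bool :=
  if i = Nm + 1 then row
  else
    (PySem.List.pyRange 0 N 1).foldl
      (fun row j => if pvForbid Nm Ng i j then row else PySem.List.pySetD row j true) row

theorem pvA_row_spec (N Nm Ng : Int) (i : Int) :
    pvA_row N Nm Ng i ((PySem.List.pyRange 0 N 1).map fun _ => false) = pvRow N Nm Ng i := by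
  unfold pvA_row pvRow
  by_cases hie : i = Nm + 1
  · rw [if_pos hie]
    exact List.map_congr_left fun j hj => by
      rw [pvAllow_eq, eq_comm, decide_eq_false_iff_not]
      intro h
      exact h.1 hie
  · rw [if_neg hie]
    apply List.ext_getElem?
    intro k
    rw [pv_rowset (fun j => pvForbid Nm Ng i j) true _
      (fun j hj => (PySem.List.mem_pyRange_one.mp hj).1) _ k]
    rw [List.length_map, PySem.List.length_pyRange_one]
    rw [List.getElem?_map, List.getElem?_map, PySem.List.getElem?_pyRange_one]
    by_cases hk : k < (N - 0).toNat
    · rw [if_pos hk]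
      simp only [Option.map_some]
      by_cases hf : pvForbid Nm Ng i (k : Int) = false
      · rw [if_pos ⟨PySem.List.mem_pyRange_one.mpr ⟨by omega, by omega⟩, hf, by omega⟩,
          pvAllow_eq]
        simp only [pvForbid, Bool.or_eq_false_iff, decide_eq_false_iff_not] at hf
        exact pv_some_decide_true ⟨hie, by omega, by omega, by omega⟩
      · rw [if_neg (fun h => hf h.2.1), pvAllow_eq]
        refine pv_some_decide_false (fun h => hf ?_)
        simp only [pvForbid, Bool.or_eq_false_iff, decide_eq_false_iff_not]
        exact ⟨⟨by omega, by omega⟩, by omega⟩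
    · rw [if_neg (fun h => hk h.2.2), if_neg hk]
      rfl

theorem pvA_mask (N Nm Ng : Int) :
    (PySem.List.pyRange 0 N 1).foldl (pvA_fM N Nm Ng)
        ((PySem.List.pyRange 0 N 1).map fun _ => (PySem.List.pyRange 0 N 1).map fun _ => false)
      = pvMask N Nm Ng := by
  have hcong :
      (PySem.List.pyRange 0 N 1).foldl (pvA_fM N Nm Ng)
          ((PySem.List.pyRange 0 N 1).map fun _ => (PySem.List.pyRange 0 N 1).map fun _ => false)
        = (PySem.List.pyRange 0 N 1).foldl
            (fun m i => PySem.List.pySetD m i (pvA_row N Nm Ng i (PySem.List.pyGetD m i [])))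
            ((PySem.List.pyRange 0 N 1).map fun _ => (PySem.List.pyRange 0 N 1).map fun _ => false) := by
    refine PySem.List.foldl_congr_mem _ _ _ _ ?_
    intro acc x hx
    have hx0 : 0 ≤ x := (PySem.List.mem_pyRange_one.mp hx).1
    unfold pvA_fM pvA_row
    by_cases hxe : x = Nm + 1
    · rw [if_pos hxe, if_pos hxe, pv_setget acc hx0]
    · rw [if_neg hxe, if_neg hxe]
      have h1 : ∀ (m : List (List Bool)), ∀ j ∈ PySem.List.pyRange 0 N 1,
          (if x = j then m
           else if Nm + Ng ≤ x ∧ j < Nm + Ng then m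
           else if x = Nm ∧ j = Nm + 1 then m
           else PySem.List.pySetD m x (PySem.List.pySetD (PySem.List.pyGetD m x []) j true))
          = PySem.List.pySetD m x
              (if pvForbid Nm Ng x j then PySem.List.pyGetD m x []
               else PySem.List.pySetD (PySem.List.pyGetD m x []) j true) := by
        intro m j _
        by_cases h1 : x = j
        · rw [if_pos h1, if_pos (show pvForbid Nm Ng x j = true by simp [pvForbid, h1])]
          exact (pv_setget m hx0).symm
        · by_cases h2 : Nm + Ng ≤ x ∧ j < Nm + Ng
          · rw [if_neg h1, if_pos h2,
              if_pos (show pvForbid Nm Ng x j = true by simp [pvForbid, h2])]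
            exact (pv_setget m hx0).symm
          · by_cases h3 : x = Nm ∧ j = Nm + 1
            · rw [if_neg h1, if_neg h2, if_pos h3,
                if_pos (show pvForbid Nm Ng x j = true by simp [pvForbid, h3])]
              exact (pv_setget m hx0).symm
            · rw [if_neg h1, if_neg h2, if_neg h3,
                if_neg (show ¬ pvForbid Nm Ng x j = true by simp [pvForbid, h1, h2, h3])]
      rw [PySem.List.foldl_congr_mem _ _ _ acc h1]
      exact pv_colfold x hx0
        (fun row j => if pvForbid Nm Ng x j then row else PySem.List.pySetD row j true)
        (PySem.List.pyRange 0 N 1) acc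
  rw [hcong]
  apply List.ext_getElem?
  intro i
  rw [pv_rowfold (pvA_row N Nm Ng) _ (fun k hk => (PySem.List.mem_pyRange_one.mp hk).1)
    (PySem.List.nodup_pyRange_one 0 N) _ i]
  unfold pvMask
  rw [List.getElem?_map, List.getElem?_map, PySem.List.getElem?_pyRange_one]
  by_cases hi : i < (N - 0).toNat
  · rw [if_pos (PySem.List.mem_pyRange_one.mpr ⟨by omega, by omega⟩), if_pos hi]
    simp only [Option.map_some]
    rw [show (0 : Int) + (i : Int) = (i : Int) by omega, pvA_row_spec N Nm Ng _]
  · rw [if_neg (fun h => hi (by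
      have := (PySem.List.mem_pyRange_one.mp h).2
      omega)), if_neg hi]
    rfl

theorem pvA_rows (N Nm Ng : Int) :
    (PySem.List.pyRange 0 N 1).foldl (pvA_fR N Nm Ng) [] = pvRows N Nm Ng := by
  have hcong : ∀ (r : List Int), ∀ x ∈ PySem.List.pyRange 0 N 1,
      pvA_fR N Nm Ng r x = r ++ (if x = Nm + 1 then []
        else ((PySem.List.pyRange 0 N 1).filter fun j => !pvForbid Nm Ng x j).map fun _ => x) := by
    intro r x _
    unfold pvA_fR
    by_cases hxe : x = Nm + 1
    · rw [if_pos hxe, if_pos hxe, List.append_nil]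
    · rw [if_neg hxe, if_neg hxe]
      have h1 : ∀ (r : List Int), ∀ j ∈ PySem.List.pyRange 0 N 1,
          (if x = j then r
           else if Nm + Ng ≤ x ∧ j < Nm + Ng then r
           else if x = Nm ∧ j = Nm + 1 then r
           else r ++ [x])
          = if (!pvForbid Nm Ng x j) = true then r ++ [(fun (_ : Int) => x) j] else r := by
        intro r j _
        by_cases h1 : x = j
        · simp [pvForbid, h1]
        · by_cases h2 : Nm + Ng ≤ x ∧ j < Nm + Ng
          · simp [pvForbid, h1, h2]
          · by_cases h3 : x = Nm ∧ j = Nm + 1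
            · simp [pvForbid, h3]
            · simp [pvForbid, h1, h2, h3]
      rw [PySem.List.foldl_congr_mem _ _ _ r h1,
        PySem.List.foldl_append_if (fun j => !pvForbid Nm Ng x j) (fun (_ : Int) => x) _ r]
  rw [PySem.List.foldl_congr_mem _ _ _ _ hcong, PySem.List.foldl_append_eq_flatMap,
    List.nil_append]
  unfold pvRows
  rw [List.flatMap_def, List.flatMap_def]
  refine congrArg List.flatten (List.map_congr_left ?_)
  intro x _
  by_cases hxe : x = Nm + 1
  · rw [if_pos hxe,
      List.filter_eq_nil_iff.mpr (fun j _ => by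
        rw [pvAllow_eq, Bool.not_eq_true, decide_eq_false_iff_not]
        intro h
        exact h.1 hxe)]
    rfl
  · rw [if_neg hxe]
    refine congrArg _ (List.filter_congr fun j _ => ?_)
    rw [pvAllow_eq]
    by_cases hf : pvForbid Nm Ng x j
    · rw [hf, Bool.not_true]
      simp only [pvForbid, Bool.or_eq_true, decide_eq_true_iff] at hf
      symm
      apply decide_eq_false
      intro h
      rcases hf with (hf | hf) | hf
      · exact h.2.1 hf
      · exact h.2.2.1 hf
      · exact h.2.2.2 hf
    · rw [Bool.not_eq_true] at hf
      rw [hf, Bool.not_false]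
      simp only [pvForbid, Bool.or_eq_false_iff, decide_eq_false_iff_not] at hf
      symm
      apply decide_eq_true
      exact ⟨hxe, hf.1.1, hf.1.2, hf.2⟩

theorem pvA_cols (N Nm Ng : Int) :
    (PySem.List.pyRange 0 N 1).foldl (pvA_fC N Nm Ng) [] = pvCols N Nm Ng := by
  have hcong : ∀ (c : List Int), ∀ x ∈ PySem.List.pyRange 0 N 1,
      pvA_fC N Nm Ng c x = c ++ (if x = Nm + 1 then []
        else (PySem.List.pyRange 0 N 1).filter fun j => !pvForbid Nm Ng x j) := by
    intro c x _
    unfold pvA_fC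
    by_cases hxe : x = Nm + 1
    · rw [if_pos hxe, if_pos hxe, List.append_nil]
    · rw [if_neg hxe, if_neg hxe]
      have h1 : ∀ (c : List Int), ∀ j ∈ PySem.List.pyRange 0 N 1,
          (if x = j then c
           else if Nm + Ng ≤ x ∧ j < Nm + Ng then c
           else if x = Nm ∧ j = Nm + 1 then c
           else c ++ [j])
          = if (!pvForbid Nm Ng x j) = true then c ++ [(fun (j : Int) => j) j] else c := by
        intro c j _
        by_cases h1 : x = j
        · simp [pvForbid, h1]
        · by_cases h2 : Nm + Ng ≤ x ∧ j < Nm + Ng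
          · simp [pvForbid, h1, h2]
          · by_cases h3 : x = Nm ∧ j = Nm + 1
            · simp [pvForbid, h3]
            · simp [pvForbid, h1, h2, h3]
      rw [PySem.List.foldl_congr_mem _ _ _ c h1,
        PySem.List.foldl_append_if (fun j => !pvForbid Nm Ng x j) (fun (j : Int) => j) _ c,
        List.map_id']
  rw [PySem.List.foldl_congr_mem _ _ _ _ hcong, PySem.List.foldl_append_eq_flatMap,
    List.nil_append]
  unfold pvCols
  rw [List.flatMap_def, List.flatMap_def]
  refine congrArg List.flatten (List.map_congr_left ?_)
  intro x _
  by_cases hxe : x = Nm + 1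
  · rw [if_pos hxe,
      List.filter_eq_nil_iff.mpr (fun j _ => by
        rw [pvAllow_eq, Bool.not_eq_true, decide_eq_false_iff_not]
        intro h
        exact h.1 hxe)]
  · rw [if_neg hxe]
    refine List.filter_congr fun j _ => ?_
    rw [pvAllow_eq]
    by_cases hf : pvForbid Nm Ng x j
    · rw [hf, Bool.not_true]
      simp only [pvForbid, Bool.or_eq_true, decide_eq_true_iff] at hf
      symm
      apply decide_eq_false
      intro h
      rcases hf with (hf | hf) | hf
      · exact h.2.1 hf
      · exact h.2.2.1 hf
      · exact h.2.2.2 hf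
    · rw [Bool.not_eq_true] at hf
      rw [hf, Bool.not_false]
      simp only [pvForbid, Bool.or_eq_false_iff, decide_eq_false_iff_not] at hf
      symm
      apply decide_eq_true
      exact ⟨hxe, hf.1.1, hf.1.2, hf.2⟩

-- B-side mask characterisation ------------------------------------------------

theorem pvB_len0 (N : Int) : (pvB_mask0 N).length = N.toNat := by
  unfold pvB_mask0
  rw [List.length_map, PySem.List.length_pyRange_one]
  omega

theorem pvB_get0 (N : Int) (i : Nat) :
    (pvB_mask0 N)[i]? =
      if i < N.toNat then some ((PySem.List.pyRange 0 N 1).map fun _ => true) else none := by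
  unfold pvB_mask0
  rw [List.getElem?_map, PySem.List.getElem?_pyRange_one]
  by_cases hi : i < (N - 0).toNat
  · rw [if_pos hi, if_pos (by omega)]
    rfl
  · rw [if_neg hi, if_neg (by omega)]
    rfl

theorem pvB_get1 (N Nm : Int) (i : Nat) :
    (pvB_mask1 N Nm)[i]? =
      if ((i : Int) = Nm + 1 ∧ (i : Int) < N) then
        some ((PySem.List.pyRange 0 N 1).map fun _ => false)
      else (pvB_mask0 N)[i]? := by
  unfold pvB_mask1
  by_cases hg : 0 ≤ Nm + 1 ∧ Nm + 1 < N
  · rw [if_pos hg, PySem.List.pySetD_of_nonneg _ _ hg.1, List.getElem?_set]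
    by_cases hik : (Nm + 1).toNat = i
    · rw [if_pos hik, if_pos (by rw [pvB_len0]; omega), if_pos ⟨by omega, by omega⟩]
    · rw [if_neg hik, if_neg (fun h => hik (by omega))]
  · rw [if_neg hg, if_neg (fun h => hg ⟨by omega, by omega⟩)]

theorem pvB_len1 (N Nm : Int) : (pvB_mask1 N Nm).length = N.toNat := by
  unfold pvB_mask1
  split
  · rw [PySem.List.length_pySetD, pvB_len0]
  · exact pvB_len0 N

theorem pvB_get2 (N Nm : Int) (i : Nat) :
    (pvB_mask2 N Nm)[i]? =
      if (i : Int) < N then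
        (pvB_mask1 N Nm)[i]?.map fun row => PySem.List.pySetD row (i : Int) false
      else (pvB_mask1 N Nm)[i]? := by
  unfold pvB_mask2
  rw [pv_rowfold (fun k row => PySem.List.pySetD row k false) _
    (fun k hk => (PySem.List.mem_pyRange_one.mp hk).1) (PySem.List.nodup_pyRange_one 0 N) _ i]
  by_cases hiN : (i : Int) < N
  · rw [if_pos (PySem.List.mem_pyRange_one.mpr ⟨by omega, hiN⟩), if_pos hiN]
  · rw [if_neg (fun h => hiN (PySem.List.mem_pyRange_one.mp h).2), if_neg hiN]

theorem pvB_len2 (N Nm : Int) : (pvB_mask2 N Nm).length = N.toNat := by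
  unfold pvB_mask2
  rw [pv_foldl_length _ _ (fun m e => PySem.List.length_pySetD _ _ _), pvB_len1]

theorem pvB_get3 (N Nm Ng : Int) (i : Nat) :
    (pvB_mask3 N Nm Ng)[i]? =
      if (max (Nm + Ng) 0 ≤ (i : Int) ∧ (i : Int) < N) then
        (pvB_mask2 N Nm)[i]?.map fun row =>
          (PySem.List.pyRange 0 (min (Nm + Ng) N) 1).foldl
            (fun row j => PySem.List.pySetD row j false) row
      else (pvB_mask2 N Nm)[i]? := by
  unfold pvB_mask3
  have hcong : ∀ (m : List (List Bool)), ∀ x ∈ PySem.List.pyRange (max (Nm + Ng) 0) N 1,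
      (PySem.List.pyRange 0 (min (Nm + Ng) N) 1).foldl
          (fun m j => PySem.List.pySetD m x (PySem.List.pySetD (PySem.List.pyGetD m x []) j false)) m
        = PySem.List.pySetD m x
            ((fun k row => (PySem.List.pyRange 0 (min (Nm + Ng) N) 1).foldl
                (fun row j => PySem.List.pySetD row j false) row) x (PySem.List.pyGetD m x [])) := by
    intro m x hx
    have hx0 : 0 ≤ x := by
      have := (PySem.List.mem_pyRange_one.mp hx).1
      omega
    exact pv_colfold x hx0 (fun row j => PySem.List.pySetD row j false) _ m
  rw [PySem.List.foldl_congr_mem _ _ _ _ hcong,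
    pv_rowfold (fun k row => (PySem.List.pyRange 0 (min (Nm + Ng) N) 1).foldl
        (fun row j => PySem.List.pySetD row j false) row) _ (fun k hk => by
      have := (PySem.List.mem_pyRange_one.mp hk).1
      omega) (PySem.List.nodup_pyRange_one _ N) _ i]
  by_cases hiN : max (Nm + Ng) 0 ≤ (i : Int) ∧ (i : Int) < N
  · rw [if_pos (PySem.List.mem_pyRange_one.mpr hiN), if_pos hiN]
  · rw [if_neg (fun h => hiN (PySem.List.mem_pyRange_one.mp h)), if_neg hiN]

theorem pvB_len3 (N Nm Ng : Int) : (pvB_mask3 N Nm Ng).length = N.toNat := by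
  unfold pvB_mask3
  rw [pv_foldl_length _ _ (fun m e =>
    pv_foldl_length _ _ (fun m' e' => PySem.List.length_pySetD _ _ _) m), pvB_len2]

-- closed-form rows of B's mask
def pvRow1 (N Nm i : Int) : List Bool :=
  if i = Nm + 1 ∧ i < N then (PySem.List.pyRange 0 N 1).map fun _ => false
  else (PySem.List.pyRange 0 N 1).map fun _ => true
def pvRow2 (N Nm i : Int) : List Bool := PySem.List.pySetD (pvRow1 N Nm i) i false
def pvRow3 (N Nm Ng i : Int) : List Bool :=
  if max (Nm + Ng) 0 ≤ i then
    (PySem.List.pyRange 0 (min (Nm + Ng) N) 1).foldl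
      (fun row j => PySem.List.pySetD row j false) (pvRow2 N Nm i)
  else pvRow2 N Nm i
def pvRow4 (N Nm Ng i : Int) : List Bool :=
  if ((0 ≤ Nm ∧ Nm < N) ∧ 0 ≤ Nm + 1 ∧ Nm + 1 < N) ∧ i = Nm then
    PySem.List.pySetD (pvRow3 N Nm Ng i) (Nm + 1) false
  else pvRow3 N Nm Ng i

theorem pvB_mask3_get (N Nm Ng : Int) (i : Nat) (hiN : (i : Int) < N) :
    (pvB_mask3 N Nm Ng)[i]? = some (pvRow3 N Nm Ng (i : Int)) := by
  rw [pvB_get3, pvB_get2, pvB_get1, pvB_get0]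
  unfold pvRow3 pvRow2 pvRow1
  by_cases h3 : max (Nm + Ng) 0 ≤ (i : Int) <;>
    by_cases h1 : (i : Int) = Nm + 1 ∧ (i : Int) < N
  · rw [if_pos ⟨h3, hiN⟩, if_pos hiN, if_pos h1, if_pos h3]
    rw [if_pos h1]
    rfl
  · rw [if_pos ⟨h3, hiN⟩, if_pos hiN, if_neg h1, if_pos (show i < N.toNat by omega),
      if_pos h3]
    rw [if_neg h1]
    rfl
  · rw [if_neg (fun h => h3 h.1), if_pos hiN, if_pos h1, if_neg h3]
    rw [if_pos h1]
    rfl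
  · rw [if_neg (fun h => h3 h.1), if_pos hiN, if_neg h1, if_pos (show i < N.toNat by omega),
      if_neg h3]
    rw [if_neg h1]
    rfl

theorem pvB_mask_get (N Nm Ng : Int) (i : Nat) (hiN : (i : Int) < N) :
    (pvB_mask N Nm Ng)[i]? = some (pvRow4 N Nm Ng (i : Int)) := by
  unfold pvB_mask pvRow4
  by_cases hg : (0 ≤ Nm ∧ Nm < N) ∧ 0 ≤ Nm + 1 ∧ Nm + 1 < N
  · have hNmget : PySem.List.pyGetD (pvB_mask3 N Nm Ng) Nm [] = pvRow3 N Nm Ng Nm := by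
      rw [PySem.List.pyGetD_of_nonneg _ _ hg.1.1, List.getD_eq_getElem?_getD,
        show (pvB_mask3 N Nm Ng)[Nm.toNat]? = some (pvRow3 N Nm Ng Nm) from by
          rw [pvB_mask3_get N Nm Ng Nm.toNat (by omega), show ((Nm.toNat : Int)) = Nm by omega]]
      rfl
    rw [if_pos hg, PySem.List.pySetD_of_nonneg _ _ hg.1.1, List.getElem?_set]
    by_cases hik : Nm.toNat = i
    · rw [if_pos hik, if_pos (by rw [pvB_len3]; omega), if_pos ⟨hg, by omega⟩, hNmget,
        show ((i : Int)) = Nm by omega]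
    · rw [if_neg hik, if_neg (fun h => hik (by omega)), pvB_mask3_get N Nm Ng i hiN]
  · rw [if_neg hg, if_neg (fun h => hg h.1), pvB_mask3_get N Nm Ng i hiN]

theorem pvB_mask_get_none (N Nm Ng : Int) (i : Nat) (hiN : ¬ (i : Int) < N) :
    (pvB_mask N Nm Ng)[i]? = none := by
  unfold pvB_mask
  have h3 : (pvB_mask3 N Nm Ng)[i]? = none := by
    rw [pvB_get3, pvB_get2, pvB_get1, pvB_get0,
      if_neg (fun h => hiN h.2), if_neg hiN, if_neg (fun h => hiN h.2), if_neg (by omega)]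
  split
  · rename_i hg
    rw [PySem.List.pySetD_of_nonneg _ _ hg.1.1, List.getElem?_set,
      if_neg (fun h => hiN (by omega))]
    exact h3
  · exact h3

-- the cleared row equals the canonical row
theorem pvRow4_eq (N Nm Ng i : Int) (hi0 : 0 ≤ i) (hiN : i < N) :
    pvRow4 N Nm Ng i = pvRow N Nm Ng i := by
  have hlen1 : (pvRow1 N Nm i).length = N.toNat := by
    unfold pvRow1
    split <;> rw [List.length_map, PySem.List.length_pyRange_one] <;> omega
  have hlen2 : (pvRow2 N Nm i).length = N.toNat := by
    unfold pvRow2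
    rw [PySem.List.length_pySetD, hlen1]
  have hlen3 : (pvRow3 N Nm Ng i).length = N.toNat := by
    unfold pvRow3
    split
    · rw [pv_foldl_length _ _ (fun m e => PySem.List.length_pySetD _ _ _), hlen2]
    · exact hlen2
  have h1 : ∀ (k : Nat), (pvRow1 N Nm i)[k]? =
      if k < N.toNat then some (!decide (i = Nm + 1)) else none := by
    intro k
    unfold pvRow1
    by_cases hie : i = Nm + 1 ∧ i < N
    · rw [if_pos hie, List.getElem?_map, PySem.List.getElem?_pyRange_one]
      by_cases hk : k < (N - 0).toNat
      · rw [if_pos hk, if_pos (by omega)]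
        simp [hie.1]
      · rw [if_neg hk, if_neg (by omega)]
        rfl
    · have hie' : ¬ i = Nm + 1 := fun h => hie ⟨h, hiN⟩
      rw [if_neg hie, List.getElem?_map, PySem.List.getElem?_pyRange_one]
      by_cases hk : k < (N - 0).toNat
      · rw [if_pos hk, if_pos (by omega)]
        simp [hie']
      · rw [if_neg hk, if_neg (by omega)]
        rfl
  have h2 : ∀ (k : Nat), (pvRow2 N Nm i)[k]? =
      if i.toNat = k then (if k < N.toNat then some false else none)
      else (pvRow1 N Nm i)[k]? := by
    intro k
    unfold pvRow2
    rw [PySem.List.pySetD_of_nonneg _ _ hi0, List.getElem?_set, hlen1]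
    by_cases hik : i.toNat = k
    · rw [if_pos hik, hik, if_pos rfl]
    · rw [if_neg hik, if_neg hik]
  have h3 : ∀ (k : Nat), (pvRow3 N Nm Ng i)[k]? =
      if (max (Nm + Ng) 0 ≤ i ∧ (k : Int) < min (Nm + Ng) N ∧ k < N.toNat) then some false
      else (pvRow2 N Nm i)[k]? := by
    intro k
    unfold pvRow3
    by_cases hmx : max (Nm + Ng) 0 ≤ i
    · rw [if_pos hmx]
      have hcong : ∀ (row : List Bool), ∀ x ∈ PySem.List.pyRange 0 (min (Nm + Ng) N) 1,
          PySem.List.pySetD row x false =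
            if (fun (_ : Int) => false) x = true then row else PySem.List.pySetD row x false := by
        intro row x _
        rw [if_neg (by simp)]
      rw [PySem.List.foldl_congr_mem _ _ _ _ hcong,
        pv_rowset (fun _ => false) false _
          (fun j hj => (PySem.List.mem_pyRange_one.mp hj).1) _ k, hlen2]
      by_cases hk : (k : Int) < min (Nm + Ng) N ∧ k < N.toNat
      · rw [if_pos ⟨PySem.List.mem_pyRange_one.mpr ⟨by omega, hk.1⟩, rfl, hk.2⟩,
          if_pos ⟨hmx, hk⟩]
      · rw [if_neg (fun h => hk ⟨(PySem.List.mem_pyRange_one.mp h.1).2, h.2.2⟩),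
          if_neg (fun h => hk h.2)]
    · rw [if_neg hmx, if_neg (fun h => hmx h.1)]
  apply List.ext_getElem?
  intro k
  have hR : (pvRow N Nm Ng i)[k]? =
      if k < N.toNat then some (pvAllow Nm Ng i (k : Int)) else none := by
    unfold pvRow
    rw [List.getElem?_map, PySem.List.getElem?_pyRange_one]
    by_cases hk : k < (N - 0).toNat
    · rw [if_pos hk, if_pos (by omega)]
      simp only [Option.map_some]
      rw [show (0 : Int) + (k : Int) = (k : Int) by omega]
    · rw [if_neg hk, if_neg (by omega)]
      rfl
  rw [hR]
  unfold pvRow4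
  by_cases hk : k < N.toNat
  · rw [if_pos hk]
    by_cases hg : ((0 ≤ Nm ∧ Nm < N) ∧ 0 ≤ Nm + 1 ∧ Nm + 1 < N) ∧ i = Nm
    · rw [if_pos hg, PySem.List.pySetD_of_nonneg _ _ hg.1.2.1, List.getElem?_set, hlen3]
      by_cases hjk : (Nm + 1).toNat = k
      · rw [if_pos hjk, if_pos (show (Nm + 1).toNat < N.toNat by omega), pvAllow_eq]
        exact pv_some_decide_false (fun h => h.2.2.2 ⟨hg.2, by omega⟩)
      · rw [if_neg hjk, h3, h2, h1]
        by_cases hc3 : max (Nm + Ng) 0 ≤ i ∧ (k : Int) < min (Nm + Ng) N ∧ k < N.toNat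
        · rw [if_pos hc3, pvAllow_eq]
          exact pv_some_decide_false (fun h => h.2.2.1 ⟨by omega, by omega⟩)
        · rw [if_neg hc3]
          by_cases hik : i.toNat = k
          · rw [if_pos hik, if_pos hk, pvAllow_eq]
            exact pv_some_decide_false (fun h => h.2.1 (by omega))
          · rw [if_neg hik, if_pos hk, pvAllow_eq]
            by_cases hie : i = Nm + 1
            · rw [decide_eq_true hie, Bool.not_true]
              exact pv_some_decide_false (fun h => h.1 hie)
            · rw [decide_eq_false hie, Bool.not_false]
              exact pv_some_decide_true ⟨hie, by omega,
                fun hcon => hc3 ⟨by omega, by omega, hk⟩, fun hcon => hjk (by omega)⟩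
    · rw [if_neg hg, h3, h2, h1]
      by_cases hc3 : max (Nm + Ng) 0 ≤ i ∧ (k : Int) < min (Nm + Ng) N ∧ k < N.toNat
      · rw [if_pos hc3, pvAllow_eq]
        exact pv_some_decide_false (fun h => h.2.2.1 ⟨by omega, by omega⟩)
      · rw [if_neg hc3]
        by_cases hik : i.toNat = k
        · rw [if_pos hik, if_pos hk, pvAllow_eq]
          exact pv_some_decide_false (fun h => h.2.1 (by omega))
        · rw [if_neg hik, if_pos hk, pvAllow_eq]
          by_cases hie : i = Nm + 1
          · rw [decide_eq_true hie, Bool.not_true]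
            exact pv_some_decide_false (fun h => h.1 hie)
          · rw [decide_eq_false hie, Bool.not_false]
            exact pv_some_decide_true ⟨hie, by omega,
              fun hcon => hc3 ⟨by omega, by omega, hk⟩,
              fun hcon => hg ⟨⟨⟨by omega, by omega⟩, by omega, by omega⟩, hcon.1⟩⟩
  · rw [if_neg hk]
    by_cases hg : ((0 ≤ Nm ∧ Nm < N) ∧ 0 ≤ Nm + 1 ∧ Nm + 1 < N) ∧ i = Nm
    · rw [if_pos hg, PySem.List.pySetD_of_nonneg _ _ hg.1.2.1, List.getElem?_set, hlen3,
        if_neg (fun (h : (Nm + 1).toNat = k) => hk (by omega)), h3, h2, h1,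
        if_neg (fun h => hk h.2.2), if_neg (fun (h : i.toNat = k) => hk (by omega)),
        if_neg hk]
    · rw [if_neg hg, h3, h2, h1, if_neg (fun h => hk h.2.2),
        if_neg (fun (h : i.toNat = k) => hk (by omega)), if_neg hk]

theorem pvB_mask_eq (N Nm Ng : Int) : pvB_mask N Nm Ng = pvMask N Nm Ng := by
  apply List.ext_getElem?
  intro i
  have hM : (pvMask N Nm Ng)[i]? =
      if (i : Int) < N then some (pvRow N Nm Ng (i : Int)) else none := by
    unfold pvMask
    rw [List.getElem?_map, PySem.List.getElem?_pyRange_one]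
    by_cases hi : i < (N - 0).toNat
    · rw [if_pos hi, if_pos (by omega)]
      simp only [Option.map_some]
      rw [show (0 : Int) + (i : Int) = (i : Int) by omega]
    · rw [if_neg hi, if_neg (by omega)]
      rfl
  rw [hM]
  by_cases hiN : (i : Int) < N
  · rw [pvB_mask_get N Nm Ng i hiN, if_pos hiN, pvRow4_eq N Nm Ng _ (by omega) hiN]
  · rw [pvB_mask_get_none N Nm Ng i hiN, if_neg hiN]

-- B's collection pass over the canonical mask ----------------------------------

theorem pvB_entry (N Nm Ng x j : Int) (hx : 0 ≤ x ∧ x < N) (hj : 0 ≤ j ∧ j < N) :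
    PySem.List.pyGetD (PySem.List.pyGetD (pvMask N Nm Ng) x []) j false = pvAllow Nm Ng x j := by
  unfold pvMask
  rw [PySem.List.pyGetD_map_pyRange_of_nonneg _ _ _ _ hx.1 hx.2]
  unfold pvRow
  rw [PySem.List.pyGetD_map_pyRange_of_nonneg _ _ _ _ hj.1 hj.2]

theorem pvB_collect_spec (N Nm Ng : Int) :
    pvB_collect N (pvMask N Nm Ng) = (pvRows N Nm Ng, pvCols N Nm Ng) := by
  unfold pvB_collect
  rw [pv_foldl_pair _ _
    (fun r i => (PySem.List.pyRange 0 N 1).foldl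
      (fun r j => if PySem.List.pyGetD (PySem.List.pyGetD (pvMask N Nm Ng) i []) j false
        then r ++ [i] else r) r)
    (fun c i => (PySem.List.pyRange 0 N 1).foldl
      (fun c j => if PySem.List.pyGetD (PySem.List.pyGetD (pvMask N Nm Ng) i []) j false
        then c ++ [j] else c) c)
    (fun s e => pv_foldl_pair _ _ _ _ (fun t j => by
      by_cases h : PySem.List.pyGetD (PySem.List.pyGetD (pvMask N Nm Ng) e []) j false
      · rw [if_pos h, if_pos h, if_pos h]
      · rw [if_neg h, if_neg h, if_neg h]) s.1 s.2) [] []]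
  have hrows : (PySem.List.pyRange 0 N 1).foldl
      (fun r i => (PySem.List.pyRange 0 N 1).foldl
        (fun r j => if PySem.List.pyGetD (PySem.List.pyGetD (pvMask N Nm Ng) i []) j false
          then r ++ [i] else r) r) ([] : List Int) = pvRows N Nm Ng := by
    have hcong : ∀ (r : List Int), ∀ x ∈ PySem.List.pyRange 0 N 1,
        (PySem.List.pyRange 0 N 1).foldl
          (fun r j => if PySem.List.pyGetD (PySem.List.pyGetD (pvMask N Nm Ng) x []) j false
            then r ++ [x] else r) r
        = r ++ ((PySem.List.pyRange 0 N 1).filter fun j => pvAllow Nm Ng x j).map fun _ => x := by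
      intro r x hx
      have h1 : ∀ (r : List Int), ∀ j ∈ PySem.List.pyRange 0 N 1,
          (if PySem.List.pyGetD (PySem.List.pyGetD (pvMask N Nm Ng) x []) j false
            then r ++ [x] else r)
          = if pvAllow Nm Ng x j = true then r ++ [(fun (_ : Int) => x) j] else r := by
        intro r j hj
        rw [pvB_entry N Nm Ng x j (PySem.List.mem_pyRange_one.mp hx)
          (PySem.List.mem_pyRange_one.mp hj)]
      rw [PySem.List.foldl_congr_mem _ _ _ r h1,
        PySem.List.foldl_append_if (fun j => pvAllow Nm Ng x j) (fun _ => x) _ r]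
    rw [PySem.List.foldl_congr_mem _ _ _ _ hcong, PySem.List.foldl_append_eq_flatMap,
      List.nil_append]
    rfl
  have hcols : (PySem.List.pyRange 0 N 1).foldl
      (fun c i => (PySem.List.pyRange 0 N 1).foldl
        (fun c j => if PySem.List.pyGetD (PySem.List.pyGetD (pvMask N Nm Ng) i []) j false
          then c ++ [j] else c) c) ([] : List Int) = pvCols N Nm Ng := by
    have hcong : ∀ (c : List Int), ∀ x ∈ PySem.List.pyRange 0 N 1,
        (PySem.List.pyRange 0 N 1).foldl
          (fun c j => if PySem.List.pyGetD (PySem.List.pyGetD (pvMask N Nm Ng) x []) j false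
            then c ++ [j] else c) c
        = c ++ ((PySem.List.pyRange 0 N 1).filter fun j => pvAllow Nm Ng x j) := by
      intro c x hx
      have h1 : ∀ (c : List Int), ∀ j ∈ PySem.List.pyRange 0 N 1,
          (if PySem.List.pyGetD (PySem.List.pyGetD (pvMask N Nm Ng) x []) j false
            then c ++ [j] else c)
          = if pvAllow Nm Ng x j = true then c ++ [(fun (j : Int) => j) j] else c := by
        intro c j hj
        rw [pvB_entry N Nm Ng x j (PySem.List.mem_pyRange_one.mp hx)
          (PySem.List.mem_pyRange_one.mp hj)]
      rw [PySem.List.foldl_congr_mem _ _ _ c h1,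
        PySem.List.foldl_append_if (fun j => pvAllow Nm Ng x j) (fun (j : Int) => j) _ c,
        List.map_id']
    rw [PySem.List.foldl_congr_mem _ _ _ _ hcong, PySem.List.foldl_append_eq_flatMap,
      List.nil_append]
    rfl
  rw [hrows, hcols]

-- final assembly ---------------------------------------------------------------

theorem pvAB (N Nm Ng : Int) :
    pvA_core N Nm Ng =
      (pvB_mask N Nm Ng, (pvB_collect N (pvB_mask N Nm Ng)).1,
        (pvB_collect N (pvB_mask N Nm Ng)).2) := by
  rw [pvB_mask_eq, pvB_collect_spec, pvA_split, pvA_mask, pvA_rows, pvA_cols]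

-- ===== VERDICT (by name: the statement is the Claim_ definition above) =====
theorem mask_structure_py_spec : Claim_equal_mask_structure_py := by
  intro info _ _
  unfold Spec_mask_structure_py mask_structure_py mask_structure_py_alt
  exact pvAB _ _ _
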